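-- pv_equiv track=rewrite | github.com/87tickly/turni-pdm | backend/src/colazione/domain/pipeline.py | soglia_pipeline_per_ruoli
-- ===== SOURCE A (Python) =====
-- from enum import StrEnum
--
-- class StatoPipelinePdc(StrEnum):
--     """Stati della catena principale (vincolante per Personale)."""
--
--     PDE_IN_LAVORAZIONE = "PDE_IN_LAVORAZIONE"
--     PDE_CONSOLIDATO = "PDE_CONSOLIDATO"
--     MATERIALE_GENERATO = "MATERIALE_GENERATO"
--     MATERIALE_CONFERMATO = "MATERIALE_CONFERMATO"
--     PDC_GENERATO = "PDC_GENERATO"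
--     PDC_CONFERMATO = "PDC_CONFERMATO"
--     PERSONALE_ASSEGNATO = "PERSONALE_ASSEGNATO"
--     VISTA_PUBBLICATA = "VISTA_PUBBLICATA"
--
-- _ORDINE_PDC: tuple[StatoPipelinePdc, ...] = tuple(StatoPipelinePdc)
--
-- def ordinale_pdc(stato: StatoPipelinePdc) -> int:
--     """Indice 0-based di ``stato`` nella sequenza pipeline PdC."""
--     return _ORDINE_PDC.index(stato)
--
-- SOGLIE_PIPELINE_PER_RUOLO: dict[str, StatoPipelinePdc] = {
--     "PIANIFICATORE_PDC": StatoPipelinePdc.MATERIALE_CONFERMATO,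
--     "GESTIONE_PERSONALE": StatoPipelinePdc.PDC_CONFERMATO,
--     "MANUTENZIONE": StatoPipelinePdc.MATERIALE_CONFERMATO,
-- }
--
-- def soglia_pipeline_per_ruoli(
--     roles: list[str], is_admin: bool
-- ) -> StatoPipelinePdc | None:
--     """Calcola lo stato minimo pipeline visibile per l'utente.
--
--     Restituisce ``None`` se l'utente vede tutti i programmi senza filtro
--     (admin o ``PIANIFICATORE_GIRO``); altrimenti lo stato di soglia
--     derivato dal ruolo più permissivo possesso.
--
--     **Semantica multi-ruolo (decisione MR 0)**: la policy fra ruoli è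
--     "OR funzionale" (l'utente può fare ciò che almeno uno dei suoi
--     ruoli gli abilita), non "AND" (intersezione least-privilege). Per
--     questo si usa ``min(soglie, key=ordinale_pdc)``: se l'utente ha
--     ``PIANIFICATORE_PDC`` deve poter agire su programmi ``>=
--     MATERIALE_CONFERMATO`` indipendentemente dal fatto che abbia anche
--     ``GESTIONE_PERSONALE`` (che richiederebbe ``>= PDC_CONFERMATO``).
--     Applicare il MAX (più restrittivo) sarebbe contraddittorio: un
--     utente multi-ruolo vedrebbe MENO di un utente con il solo ruolo
--     più basso. La sicurezza per-azione resta affidata a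
--     ``require_role(...)`` sui singoli endpoint.
--
--     Se l'utente non ha alcun ruolo conosciuto, restituisce ``None``: la
--     dependency d'auth a monte (``require_any_role(...)``) avrà già
--     rifiutato la chiamata, quindi il caller non deve mai ritrovarsi
--     qui senza ruoli ammissibili.
--     """
--     if is_admin or "PIANIFICATORE_GIRO" in roles:
--         return None
--     soglie = [
--         SOGLIE_PIPELINE_PER_RUOLO[r] for r in roles if r in SOGLIE_PIPELINE_PER_RUOLO
--     ]
--     if not soglie:
--         return None
--     return min(soglie, key=ordinale_pdc)
-- ===== SOURCE B (Python) =====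
-- from enum import StrEnum
--
-- class StatoPipelinePdc(StrEnum):
--     PDE_IN_LAVORAZIONE = "PDE_IN_LAVORAZIONE"
--     PDE_CONSOLIDATO = "PDE_CONSOLIDATO"
--     MATERIALE_GENERATO = "MATERIALE_GENERATO"
--     MATERIALE_CONFERMATO = "MATERIALE_CONFERMATO"
--     PDC_GENERATO = "PDC_GENERATO"
--     PDC_CONFERMATO = "PDC_CONFERMATO"
--     PERSONALE_ASSEGNATO = "PERSONALE_ASSEGNATO"
--     VISTA_PUBBLICATA = "VISTA_PUBBLICATA"
--
-- _ORDINE_PDC = tuple(StatoPipelinePdc)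
--
-- SOGLIE_PIPELINE_PER_RUOLO = {
--     "PIANIFICATORE_PDC": StatoPipelinePdc.MATERIALE_CONFERMATO,
--     "GESTIONE_PERSONALE": StatoPipelinePdc.PDC_CONFERMATO,
--     "MANUTENZIONE": StatoPipelinePdc.MATERIALE_CONFERMATO,
-- }
--
-- def soglia_pipeline_per_ruoli(roles, is_admin):
--     """Scan the ordered pipeline and return the first state that is a
--     threshold of one of the user's known roles (None if unfiltered or
--     no known role)."""
--     if is_admin or "PIANIFICATORE_GIRO" in roles:
--         return None
--     target = {
--         SOGLIE_PIPELINE_PER_RUOLO[r] for r in roles if r in SOGLIE_PIPELINE_PER_RUOLO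
--     }
--     for stato in _ORDINE_PDC:
--         if stato in target:
--             return stato
--     return None
-- ===== Notes on version B (the rewrite author's own statement) =====
-- stated objective: alternative
-- what changed: B replaces A's collect-all-role-thresholds-then-min(key=ordinal) with a single ordered scan of the pipeline states that returns the first state belonging to the set of the user's role thresholds.
import Mathlib
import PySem

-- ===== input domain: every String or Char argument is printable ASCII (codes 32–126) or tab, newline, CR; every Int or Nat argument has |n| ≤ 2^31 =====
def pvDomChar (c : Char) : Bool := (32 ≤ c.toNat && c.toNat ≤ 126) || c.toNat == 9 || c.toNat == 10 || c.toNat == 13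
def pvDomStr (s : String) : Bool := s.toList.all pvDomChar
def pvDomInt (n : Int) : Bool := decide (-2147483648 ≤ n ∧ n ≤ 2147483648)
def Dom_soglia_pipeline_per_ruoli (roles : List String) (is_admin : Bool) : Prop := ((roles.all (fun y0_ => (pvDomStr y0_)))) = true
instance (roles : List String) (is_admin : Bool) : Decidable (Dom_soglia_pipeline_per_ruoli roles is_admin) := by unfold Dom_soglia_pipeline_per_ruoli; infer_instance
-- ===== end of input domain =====

-- B replaces A's collect-then-min-by-ordinal with a single scan of the ordered
-- pipeline returning the first state that is a threshold of one of the user's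
-- known roles (objective: alternative decomposition, same cost).

-- ===== PORT A =====
-- _ORDINE_PDC (the enum's declaration order)
def pdcStati : List String :=
  ["PDE_IN_LAVORAZIONE", "PDE_CONSOLIDATO", "MATERIALE_GENERATO", "MATERIALE_CONFERMATO",
   "PDC_GENERATO", "PDC_CONFERMATO", "PERSONALE_ASSEGNATO", "VISTA_PUBBLICATA"]

-- list.index; 'getD 0' is unreachable: A only calls it on members of pdcStati
def ordinale_pdc (stato : String) : Int :=
  ((PySem.List.index? pdcStati stato).getD 0 : Nat)

def soglieRuolo : PySem.Dict String String :=
  PySem.Dict.ofList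
    [("PIANIFICATORE_PDC", "MATERIALE_CONFERMATO"),
     ("GESTIONE_PERSONALE", "PDC_CONFERMATO"),
     ("MANUTENZIONE", "MATERIALE_CONFERMATO")]

def soglia_pipeline_per_ruoli (roles : List String) (is_admin : Bool) : Option String :=
  if is_admin || roles.contains "PIANIFICATORE_GIRO" then none
  else
    let soglie := roles.filterMap (fun r => soglieRuolo.get? r)
    if soglie = [] then none
    else PySem.List.min? soglie ordinale_pdc

-- ===== PORT B =====
def soglia_pipeline_per_ruoli_alt (roles : List String) (is_admin : Bool) : Option String :=
  if is_admin || roles.contains "PIANIFICATORE_GIRO" then none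
  else
    let target : PySem.Set String :=
      PySem.Set.ofList (roles.filterMap (fun r => soglieRuolo.get? r))
    pdcStati.find? (fun stato => PySem.Set.contains target stato)

-- ===== PRECONDITION & SPEC =====
def Spec_soglia_pipeline_per_ruoli (roles : List String) (is_admin : Bool) (out : Option String) : Prop := out = soglia_pipeline_per_ruoli_alt roles is_admin
instance (roles : List String) (is_admin : Bool) (out : Option String) : Decidable (Spec_soglia_pipeline_per_ruoli roles is_admin out) := by unfold Spec_soglia_pipeline_per_ruoli; infer_instance

-- ===== CLAIM (what is proved, stated in full; the proofs are below) =====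
def Claim_equal_soglia_pipeline_per_ruoli : Prop := ∀ (roles : List String) (is_admin : Bool), Dom_soglia_pipeline_per_ruoli roles is_admin → Spec_soglia_pipeline_per_ruoli roles is_admin (soglia_pipeline_per_ruoli roles is_admin)

-- ===== LEMMAS AND PROOFS =====

theorem soglieRuolo_eq_mk :
    soglieRuolo = PySem.Dict.mk
      [("PIANIFICATORE_PDC", "MATERIALE_CONFERMATO"),
       ("GESTIONE_PERSONALE", "PDC_CONFERMATO"),
       ("MANUTENZIONE", "MATERIALE_CONFERMATO")] := by decide

-- the only values soglieRuolo.get? can return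
theorem soglieRuolo_get?_char (r : String) :
    soglieRuolo.get? r =
      if r = "PIANIFICATORE_PDC" then some "MATERIALE_CONFERMATO"
      else if r = "GESTIONE_PERSONALE" then some "PDC_CONFERMATO"
      else if r = "MANUTENZIONE" then some "MATERIALE_CONFERMATO"
      else none := by
  by_cases h1 : r = "PIANIFICATORE_PDC"
  · subst h1; decide
  by_cases h2 : r = "GESTIONE_PERSONALE"
  · subst h2; simp [h1]; decide
  by_cases h3 : r = "MANUTENZIONE"
  · subst h3; simp [h1, h2]; decide
  rw [soglieRuolo_eq_mk]
  simp [PySem.Dict.get?, beq_iff_eq,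
        Ne.symm h1, Ne.symm h2, Ne.symm h3, h1, h2, h3]

theorem mem_soglie (roles : List String) (x : String) :
    x ∈ roles.filterMap (fun r => soglieRuolo.get? r) ↔
      (x = "MATERIALE_CONFERMATO" ∧
        ("PIANIFICATORE_PDC" ∈ roles ∨ "MANUTENZIONE" ∈ roles)) ∨
      (x = "PDC_CONFERMATO" ∧ "GESTIONE_PERSONALE" ∈ roles) := by
  simp only [List.mem_filterMap]
  constructor
  · rintro ⟨r, hr, hx⟩
    rw [soglieRuolo_get?_char] at hx
    split_ifs at hx with h1 h2 h3 <;> simp_all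
  · rintro (⟨rfl, h | h⟩ | ⟨rfl, h⟩)
    · exact ⟨_, h, by rw [soglieRuolo_get?_char]; rfl⟩
    · exact ⟨_, h, by rw [soglieRuolo_get?_char]; rfl⟩
    · exact ⟨_, h, by rw [soglieRuolo_get?_char]; rfl⟩

theorem soglie_eq_nil_iff (roles : List String) :
    roles.filterMap (fun r => soglieRuolo.get? r) = [] ↔
      "PIANIFICATORE_PDC" ∉ roles ∧ "MANUTENZIONE" ∉ roles ∧
      "GESTIONE_PERSONALE" ∉ roles := by
  rw [List.eq_nil_iff_forall_not_mem]
  constructor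
  · intro h
    refine ⟨fun hp => ?_, fun hm => ?_, fun hg => ?_⟩
    · exact h _ ((mem_soglie roles _).2 (Or.inl ⟨rfl, Or.inl hp⟩))
    · exact h _ ((mem_soglie roles _).2 (Or.inl ⟨rfl, Or.inr hm⟩))
    · exact h _ ((mem_soglie roles _).2 (Or.inr ⟨rfl, hg⟩))
  · rintro ⟨hp, hm, hg⟩ x hx
    rcases (mem_soglie roles x).1 hx with ⟨_, h | h⟩ | ⟨_, h⟩ <;> tauto

-- Python's min-by-key loop, on a nonempty list drawn from the two threshold states
theorem min?_cons_char : ∀ (t : List String) (best : String),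
    (best = "MATERIALE_CONFERMATO" ∨ best = "PDC_CONFERMATO") →
    (∀ x ∈ t, x = "MATERIALE_CONFERMATO" ∨ x = "PDC_CONFERMATO") →
    PySem.List.min? (best :: t) ordinale_pdc =
      some (if best = "MATERIALE_CONFERMATO" ∨ "MATERIALE_CONFERMATO" ∈ t then
        "MATERIALE_CONFERMATO" else "PDC_CONFERMATO")
  | [], best, hb, _ => by
      rcases hb with rfl | rfl <;> simp [PySem.List.min?]
  | x :: t, best, hb, ht => by
      have hx := ht x List.mem_cons_self
      have ht' := fun y hy => ht y (List.mem_cons_of_mem _ hy)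
      have key : PySem.List.min? (best :: x :: t) ordinale_pdc =
          PySem.List.min?
            ((if ordinale_pdc x < ordinale_pdc best then x else best) :: t)
            ordinale_pdc := by
        by_cases hlt : ordinale_pdc x < ordinale_pdc best <;>
          simp [PySem.List.min?, hlt]
      rw [key, min?_cons_char t _ (by split <;> tauto) ht']
      rcases hb with rfl | rfl <;> rcases hx with rfl | rfl <;>
        simp only [show (ordinale_pdc "MATERIALE_CONFERMATO" = 3) from rfl,
                   show (ordinale_pdc "PDC_CONFERMATO" = 5) from rfl] <;>
        norm_num <;> simp

theorem min?_char (l : List String)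
    (hall : ∀ x ∈ l, x = "MATERIALE_CONFERMATO" ∨ x = "PDC_CONFERMATO") :
    PySem.List.min? l ordinale_pdc =
      if l = [] then none
      else if "MATERIALE_CONFERMATO" ∈ l then some "MATERIALE_CONFERMATO"
      else some "PDC_CONFERMATO" := by
  cases l with
  | nil => rfl
  | cons h t =>
    have hh := hall h List.mem_cons_self
    have ht := fun y hy => hall y (List.mem_cons_of_mem _ hy)
    rw [min?_cons_char t h hh ht]
    rcases hh with rfl | rfl <;> simp [apply_ite]

-- membership in the B-side set of thresholds
theorem contains_target (roles : List String) (x : String) :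
    PySem.Set.contains
      (PySem.Set.ofList (roles.filterMap (fun r => soglieRuolo.get? r))) x =
    decide (x ∈ roles.filterMap (fun r => soglieRuolo.get? r)) := by
  simp [PySem.Set.contains, PySem.Set.mem_ofList]

-- ===== VERDICT (by name: the statement is the Claim_ definition above) =====
theorem soglia_pipeline_per_ruoli_spec : Claim_equal_soglia_pipeline_per_ruoli := by
  intro roles is_admin _
  unfold Spec_soglia_pipeline_per_ruoli
  unfold soglia_pipeline_per_ruoli soglia_pipeline_per_ruoli_alt
  by_cases hguard : (is_admin || roles.contains "PIANIFICATORE_GIRO") = true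
  · rw [if_pos hguard, if_pos hguard]
  · rw [if_neg hguard, if_neg hguard]
    dsimp only
    rw [min?_char _ (fun x hx => by
      rcases (mem_soglie roles x).1 hx with ⟨h, _⟩ | ⟨h, _⟩ <;> tauto)]
    simp only [pdcStati, List.find?, contains_target]
    by_cases hp : "PIANIFICATORE_PDC" ∈ roles <;>
    by_cases hm : "MANUTENZIONE" ∈ roles <;>
    by_cases hg : "GESTIONE_PERSONALE" ∈ roles <;>
      simp [← List.mem_filterMap, ← List.filterMap_eq_nil_iff, mem_soglie,
            soglie_eq_nil_iff, hp, hm, hg]
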